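-- pv_equiv track=rewrite | github.com/Elvich/Algorithms-and-data-structures | Term 2/Para 28.04.2025/Two.py | filter_stack
-- ===== SOURCE A (Python) =====
-- def is_prime(n):
--     if n <= 1:
--         return False
--     for i in range(2, int(n**0.5) + 1):
--         if n % i == 0:
--             return False
--     return True
--
-- def filter_stack(stack):
--     temp_stack = []
--     while stack:
--         element = stack.pop()
--         if is_prime(element):
--             temp_stack.append(element)
--     while temp_stack:
--         stack.append(temp_stack.pop())
--     return stack
-- ===== SOURCE B (Python) =====
-- def is_prime(n):
--     if n <= 1:
--         return False
--     for i in range(2, int(n**0.5) + 1):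
--         if n % i == 0:
--             return False
--     return True
--
-- def _has_divisor(n, i):
--     while i * i <= n:
--         if n % i == 0:
--             return True
--         i += 1
--     return False
--
-- def filter_stack(stack):
--     stack[:] = [x for x in stack if x >= 2 and not _has_divisor(x, 2)]
--     return stack
-- ===== Notes on version B (the rewrite author's own statement) =====
-- stated objective: simpler
-- what changed: Replaced A's pop-to-temp-stack-and-pop-back double-reversal scheme with a single forward filtering pass assigned back in place, and replaced the sqrt-bounded range scan of is_prime with a growing trial divisor tested against i*i <= n.
import Mathlib
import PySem

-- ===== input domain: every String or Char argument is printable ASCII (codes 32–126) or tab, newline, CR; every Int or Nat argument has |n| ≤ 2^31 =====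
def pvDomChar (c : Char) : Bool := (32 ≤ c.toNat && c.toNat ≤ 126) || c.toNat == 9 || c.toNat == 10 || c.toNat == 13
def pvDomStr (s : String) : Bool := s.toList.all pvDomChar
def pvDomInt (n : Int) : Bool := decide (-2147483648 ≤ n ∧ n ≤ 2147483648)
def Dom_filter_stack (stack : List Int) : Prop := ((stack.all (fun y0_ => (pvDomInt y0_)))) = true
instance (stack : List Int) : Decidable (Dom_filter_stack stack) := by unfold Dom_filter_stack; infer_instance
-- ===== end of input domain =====

-- B replaces A's pop-to-temp-stack / pop-back double-reversal scheme with one forward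
-- filtering pass, and tests primality by a growing trial divisor bounded by i*i ≤ n instead
-- of A's precomputed-sqrt range scan (objective: simpler). Both A and B mutate the argument
-- list in place in Python and end with the same contents; the equivalence proved here is
-- about the return value.

-- ===== PORT A =====
-- is_prime: `int(n**0.5)` equals Nat.sqrt on the domain |n| ≤ 2^31 (double sqrt is exact there).
def is_prime (n : Int) : Bool :=
  if n ≤ 1 then false
  else if (PySem.List.pyRange 2 ((Nat.sqrt n.toNat : Int) + 1) 1).any
            (fun i => PySem.Int.mod n i == 0) then false
  else true

-- first while loop: stack.pop() takes elements from the end, so it walks stack.reverse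
def fsLoop1 : List Int → List Int → List Int
  | [], temp => temp
  | e :: rest, temp => fsLoop1 rest (if is_prime e then temp ++ [e] else temp)

-- second while loop: temp_stack.pop() walks temp_stack.reverse, appending to stack (now empty)
def fsLoop2 : List Int → List Int → List Int
  | [], acc => acc
  | e :: rest, acc => fsLoop2 rest (acc ++ [e])

def filter_stack (stack : List Int) : List Int :=
  let temp_stack := fsLoop1 stack.reverse []
  fsLoop2 temp_stack.reverse []

-- ===== PORT B =====
-- B's `_has_divisor` while loop: i grows until i*i > n, reporting whether some i divides n.
-- Structural recursion on a fuel counter; fuel (n+1-i).toNat bounds the iteration count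
-- (the loop runs only while i ≤ n), so the guard never changes the computed value.
def hasDivAux (n : Int) : Int → Nat → Bool
  | _, 0 => false
  | i, fuel + 1 =>
    if n < i * i then false
    else if PySem.Int.mod n i == 0 then true
    else hasDivAux n (i + 1) fuel

def has_divisor (n i : Int) : Bool := hasDivAux n i (n + 1 - i).toNat

def filter_stack_alt (stack : List Int) : List Int :=
  stack.filter (fun x => 2 ≤ x && !has_divisor x 2)

-- ===== PRECONDITION & SPEC =====
def Spec_filter_stack (stack : List Int) (out : List Int) : Prop := out = filter_stack_alt stack
instance (stack : List Int) (out : List Int) : Decidable (Spec_filter_stack stack out) := by unfold Spec_filter_stack; infer_instance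

-- ===== CLAIM (what is proved, stated in full; the proofs are below) =====
def Claim_equal_filter_stack : Prop := ∀ (stack : List Int), Dom_filter_stack stack → Spec_filter_stack stack (filter_stack stack)

-- ===== LEMMAS AND PROOFS =====
theorem fsLoop1_eq (l acc : List Int) :
    fsLoop1 l acc = acc ++ l.filter (fun x => is_prime x) := by
  induction l generalizing acc with
  | nil => simp [fsLoop1]
  | cons e rest ih =>
    simp only [fsLoop1, ih, List.filter_cons]
    by_cases h : is_prime e <;> simp [h]

theorem fsLoop2_eq (l acc : List Int) : fsLoop2 l acc = acc ++ l := by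
  induction l generalizing acc with
  | nil => simp [fsLoop2]
  | cons e rest ih => simp [fsLoop2, ih]

-- B's while loop scans exactly the divisors A's range(2, isqrt(n)+1) scans.
theorem hasDivAux_eq (n : Int) (hn : 0 ≤ n) : ∀ (fuel : Nat) (i : Int), 1 ≤ i →
    (n + 1 - i).toNat ≤ fuel →
    hasDivAux n i fuel
      = (PySem.List.pyRange i ((Nat.sqrt n.toNat : Int) + 1) 1).any
          (fun d => PySem.Int.mod n d == 0) := by
  intro fuel
  induction fuel with
  | zero =>
    intro i hi hf
    have hs : Nat.sqrt n.toNat ≤ n.toNat := Nat.sqrt_le_self n.toNat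
    rw [PySem.List.pyRange_one_eq_nil (by omega)]
    simp [hasDivAux]
  | succ fuel ih =>
    intro i hi hf
    by_cases h : n < i * i
    · -- n < i*i : the loop stops at once and the range is empty
      have hs : Nat.sqrt n.toNat < i.toNat := by
        have h3 : n.toNat < i.toNat ^ 2 := by
          have h2 : (i.toNat : Int) = i := Int.toNat_of_nonneg (by omega)
          rw [pow_two]; zify [h2]; omega
        exact (Nat.sqrt_lt').mpr h3
      rw [PySem.List.pyRange_one_eq_nil (by omega)]
      simp [hasDivAux, h]
    · -- i*i ≤ n : i is in the range; test it, then step to i+1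
      have hii : i ≤ i * i := le_mul_of_one_le_left (by omega) hi
      have hs : i ≤ (Nat.sqrt n.toNat : Int) := by
        have h3 : i.toNat ^ 2 ≤ n.toNat := by
          have h2 : (i.toNat : Int) = i := Int.toNat_of_nonneg (by omega)
          rw [pow_two]; zify [h2]; omega
        have := Nat.le_sqrt'.mpr h3
        omega
      rw [PySem.List.pyRange_one_cons (by omega), List.any_cons]
      by_cases hm : PySem.Int.mod n i == 0
      · simp [hasDivAux, h, hm]
      · rw [show hasDivAux n i (fuel + 1) = hasDivAux n (i + 1) fuel by
              simp [hasDivAux, h, hm],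
            ih (i + 1) (by omega) (by omega)]
        simp [hm]

theorem has_divisor_eq_any (n : Int) (hn : 0 ≤ n) (i : Int) (hi : 1 ≤ i) :
    has_divisor n i
      = (PySem.List.pyRange i ((Nat.sqrt n.toNat : Int) + 1) 1).any
          (fun d => PySem.Int.mod n d == 0) :=
  hasDivAux_eq n hn ((n + 1 - i).toNat) i hi (le_refl _)

theorem is_prime_eq (n : Int) : is_prime n = (2 ≤ n && !has_divisor n 2) := by
  by_cases h : n ≤ 1
  · have h2 : ¬ (2 ≤ n) := by omega
    simp [is_prime, h, h2]
  · rw [is_prime, if_neg h, has_divisor_eq_any n (by omega) 2 (by omega)]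
    by_cases ha : (PySem.List.pyRange 2 ((Nat.sqrt n.toNat : Int) + 1) 1).any
        (fun d => PySem.Int.mod n d == 0)
    · simp [ha]
    · simp [ha]; omega

-- ===== VERDICT (by name: the statement is the Claim_ definition above) =====
theorem filter_stack_spec : Claim_equal_filter_stack := by
  intro stack _
  show filter_stack stack = filter_stack_alt stack
  simp only [filter_stack, filter_stack_alt, fsLoop1_eq, fsLoop2_eq, List.nil_append,
    List.filter_reverse, List.reverse_reverse]
  exact List.filter_congr (fun x _ => is_prime_eq x)
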